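-- pv_equiv track=rewrite | github.com/dude-inn/bizscan | scripts/generate_demo_gamma_report.py | _compact_blocks
-- ===== SOURCE A (Python) =====
-- def _compact_blocks(raw_text: str, max_cards: int = 55) -> str:
--     blocks = [block.strip() for block in raw_text.split('\n\n') if block.strip()]
--     if len(blocks) <= max_cards:
--         return '\n\n'.join(blocks)
--
--     merged: list[str] = []
--     chunk: list[str] = []
--     target = max(1, len(blocks) // max_cards + (1 if len(blocks) % max_cards else 0))
--
--     for block in blocks:
--         chunk.append(block)
--         if len(chunk) >= target and len(merged) < max_cards - 1:
--             merged.append('\n'.join(chunk))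
--             chunk = []
--     if chunk:
--         merged.append('\n'.join(chunk))
--
--     return '\n\n'.join(merged)
-- ===== SOURCE B (Python) =====
-- def _compact_blocks(raw_text: str, max_cards: int = 55) -> str:
--     blocks = [block.strip() for block in raw_text.split('\n\n') if block.strip()]
--     n = len(blocks)
--     if n <= max_cards:
--         return '\n\n'.join(blocks)
--     target = max(1, n // max_cards + (1 if n % max_cards else 0))
--     groups = []
--     i = 0
--     while i < n and len(groups) < max_cards - 1:
--         groups.append(blocks[i:i + target])
--         i += target
--     if i < n:
--         groups.append(blocks[i:])
--     return '\n\n'.join('\n'.join(g) for g in groups)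
-- ===== Notes on version B (the rewrite author's own statement) =====
-- stated objective: simpler
-- what changed: Replaces A's per-block accumulator with a flush condition (append to chunk, emit when it reaches target and the merged cap allows) by directly slicing the block list into groups of target blocks, capped at max_cards-1 groups with the remainder as the final group.
import Mathlib
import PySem

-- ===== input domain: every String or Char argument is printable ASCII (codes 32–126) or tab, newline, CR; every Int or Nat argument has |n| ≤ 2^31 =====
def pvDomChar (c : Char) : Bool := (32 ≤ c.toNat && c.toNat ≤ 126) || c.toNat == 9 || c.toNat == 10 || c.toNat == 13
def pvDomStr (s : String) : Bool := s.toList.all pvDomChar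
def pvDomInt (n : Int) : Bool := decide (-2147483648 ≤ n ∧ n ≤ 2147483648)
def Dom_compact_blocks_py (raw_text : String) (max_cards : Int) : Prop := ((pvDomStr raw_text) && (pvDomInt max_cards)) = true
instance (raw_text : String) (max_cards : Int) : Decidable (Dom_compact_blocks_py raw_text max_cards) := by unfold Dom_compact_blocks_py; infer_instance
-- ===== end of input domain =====

-- B replaces A's per-block accumulator-and-flush loop by slicing the block list directly
-- into groups of `target` blocks (capped at max_cards-1 groups plus the remainder): simpler decomposition, same result.

-- ===== PORT A =====
-- shared first line of both Pythons: [block.strip() for block in raw_text.split('\n\n') if block.strip()]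
def pvBlocks (raw_text : String) : List String :=
  (((PySem.Str.split? raw_text "\n\n").getD []).map PySem.Str.strip).filter (fun b => b ≠ "")

-- shared second line: target = max(1, len(blocks) // max_cards + (1 if len(blocks) % max_cards else 0))
def pvTarget (n max_cards : Int) : Int :=
  max 1 (PySem.Int.floordiv n max_cards + (if PySem.Int.mod n max_cards ≠ 0 then 1 else 0))

-- the body of A's `for block in blocks:` loop; state = (merged, chunk)
def pvAStep (target cap : Int) (st : List String × List String) (block : String) :
    List String × List String :=
  let chunk := st.2 ++ [block]
  if target ≤ (chunk.length : Int) ∧ (st.1.length : Int) < cap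
  then (st.1 ++ [PySem.Str.join "\n" chunk], [])
  else (st.1, chunk)

-- A's trailing `if chunk: merged.append('\n'.join(chunk))`
def pvFinish (st : List String × List String) : List String :=
  if st.2 ≠ [] then st.1 ++ [PySem.Str.join "\n" st.2] else st.1

def compact_blocks_py (raw_text : String) (max_cards : Int) : String :=
  let blocks := pvBlocks raw_text
  if (blocks.length : Int) ≤ max_cards then PySem.Str.join "\n\n" blocks
  else
    let target := pvTarget (blocks.length : Int) max_cards
    let st := blocks.foldl (pvAStep target (max_cards - 1)) ([], [])
    PySem.Str.join "\n\n" (pvFinish st)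

-- ===== PORT B =====
-- B's `while i < n and len(groups) < max_cards - 1: groups.append(blocks[i:i+target]); i += target`
-- followed by `if i < n: groups.append(blocks[i:])`, as recursion on the remaining suffix blocks[i:]
def pvAltLoop (target : Int) (cap : Int) (bs : List String) : List (List String) :=
  if bs = [] then []
  else if cap ≤ 0 then [bs]
  else PySem.List.slice bs none (some target) ::
       pvAltLoop target (cap - 1) (PySem.List.slice bs (some target) none)
termination_by cap.toNat
decreasing_by
  rename_i _ h2
  omega

def compact_blocks_py_alt (raw_text : String) (max_cards : Int) : String :=
  let blocks := pvBlocks raw_text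
  if (blocks.length : Int) ≤ max_cards then PySem.Str.join "\n\n" blocks
  else
    let target := pvTarget (blocks.length : Int) max_cards
    let groups := pvAltLoop target (max_cards - 1) blocks
    PySem.Str.join "\n\n" (groups.map (PySem.Str.join "\n"))

-- ===== PRECONDITION & SPEC =====
-- Pre_ excludes exactly the inputs where both Pythons raise ZeroDivisionError:
-- max_cards = 0 with at least one nonempty block (i.e. raw_text not all whitespace).
def Pre_compact_blocks_py (raw_text : String) (max_cards : Int) : Prop :=
  max_cards ≠ 0 ∨ PySem.Str.strip raw_text = ""
instance (raw_text : String) (max_cards : Int) : Decidable (Pre_compact_blocks_py raw_text max_cards) := by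
  unfold Pre_compact_blocks_py; infer_instance

def pvWitness_compact_blocks_py : String × Int := ("alpha\n\nbeta\n\ngamma", 2)

def Spec_compact_blocks_py (raw_text : String) (max_cards : Int) (out : String) : Prop :=
  out = compact_blocks_py_alt raw_text max_cards
instance (raw_text : String) (max_cards : Int) (out : String) : Decidable (Spec_compact_blocks_py raw_text max_cards out) := by
  unfold Spec_compact_blocks_py; infer_instance

-- ===== CLAIM (what is proved, stated in full; the proofs are below) =====
def Claim_equal_compact_blocks_py : Prop := ∀ (raw_text : String) (max_cards : Int), Dom_compact_blocks_py raw_text max_cards → Pre_compact_blocks_py raw_text max_cards → Spec_compact_blocks_py raw_text max_cards (compact_blocks_py raw_text max_cards)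

-- ===== LEMMAS AND PROOFS =====

-- once merged is full (cap many chunks), A's loop only accumulates into chunk
theorem pvAStep_full (t cap : Int) (bs : List String) :
    ∀ (merged chunk : List String), cap ≤ (merged.length : Int) →
    bs.foldl (pvAStep t cap) (merged, chunk) = (merged, chunk ++ bs) := by
  induction bs with
  | nil => intro merged chunk _; simp
  | cons b rest ih =>
    intro merged chunk h
    have : pvAStep t cap (merged, chunk) b = (merged, chunk ++ [b]) := by
      simp only [pvAStep]
      rw [if_neg]; rintro ⟨-, h2⟩; omega
    simp only [List.foldl_cons, this, ih _ _ h, List.append_assoc, List.singleton_append]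

-- too few blocks left to reach target: no flush happens
theorem pvAStep_small (t cap : Int) (bs : List String) :
    ∀ (merged chunk : List String), (chunk.length + bs.length : Int) < t →
    bs.foldl (pvAStep t cap) (merged, chunk) = (merged, chunk ++ bs) := by
  induction bs with
  | nil => intro merged chunk _; simp
  | cons b rest ih =>
    intro merged chunk h
    simp only [List.length_cons, Nat.cast_add, Nat.cast_one] at h
    have : pvAStep t cap (merged, chunk) b = (merged, chunk ++ [b]) := by
      simp only [pvAStep]
      rw [if_neg]; rintro ⟨h1, -⟩
      simp only [List.length_append, List.length_cons, List.length_nil, Nat.cast_add,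
        Nat.cast_one, Nat.cast_zero] at h1
      omega
    have h' : ((chunk ++ [b]).length + rest.length : Int) < t := by
      simp only [List.length_append, List.length_cons, List.length_nil, Nat.cast_add,
        Nat.cast_one, Nat.cast_zero]
      omega
    simp only [List.foldl_cons, this, ih _ _ h', List.append_assoc, List.singleton_append]

-- enough blocks left: the next flush closes the chunk after exactly t - |chunk| more blocks
theorem pvAStep_flush (t cap : Int) (bs : List String) :
    ∀ (merged chunk : List String), (merged.length : Int) < cap →
    (chunk.length : Int) < t → t ≤ (chunk.length + bs.length : Int) →
    bs.foldl (pvAStep t cap) (merged, chunk) =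
      (bs.drop (t - chunk.length).toNat).foldl (pvAStep t cap)
        (merged ++ [PySem.Str.join "\n" (chunk ++ bs.take (t - chunk.length).toNat)], []) := by
  induction bs with
  | nil =>
    intro merged chunk h1 h2 h3
    simp only [List.length_nil, Nat.cast_zero, Int.add_zero] at h3
    omega
  | cons b rest ih =>
    intro merged chunk h1 h2 h3
    by_cases hfl : t ≤ (chunk.length : Int) + 1
    · -- flush now: t = chunk.length + 1
      have ht : (t - (chunk.length : Int)).toNat = 1 := by omega
      have : pvAStep t cap (merged, chunk) b = (merged ++ [PySem.Str.join "\n" (chunk ++ [b])], []) := by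
        simp only [pvAStep]
        rw [if_pos]
        refine ⟨?_, h1⟩
        simp only [List.length_append, List.length_cons, List.length_nil, Nat.cast_add,
          Nat.cast_one, Nat.cast_zero]
        omega
      simp only [List.foldl_cons, this, ht, List.take_succ_cons, List.take_zero,
        List.drop_succ_cons, List.drop_zero]
    · -- keep accumulating
      have : pvAStep t cap (merged, chunk) b = (merged, chunk ++ [b]) := by
        simp only [pvAStep]
        rw [if_neg]; rintro ⟨hc, -⟩
        simp only [List.length_append, List.length_cons, List.length_nil, Nat.cast_add,
          Nat.cast_one, Nat.cast_zero] at hc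
        omega
      have h2' : (((chunk ++ [b]).length : Nat) : Int) < t := by
        simp only [List.length_append, List.length_cons, List.length_nil, Nat.cast_add,
          Nat.cast_one, Nat.cast_zero]
        omega
      have h3' : t ≤ ((chunk ++ [b]).length + rest.length : Int) := by
        simp only [List.length_cons, Nat.cast_add, Nat.cast_one] at h3
        simp only [List.length_append, List.length_cons, List.length_nil, Nat.cast_add,
          Nat.cast_one, Nat.cast_zero]
        omega
      have hnn : (t - ((chunk ++ [b]).length : Int)).toNat + 1 = (t - (chunk.length : Int)).toNat := by
        simp only [List.length_append, List.length_cons, List.length_nil, Nat.cast_add,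
          Nat.cast_one, Nat.cast_zero]
        omega
      rw [List.foldl_cons, this, ih _ _ h1 h2' h3']
      rw [← hnn]
      simp only [List.take_succ_cons, List.drop_succ_cons, List.append_assoc, List.singleton_append]

-- unfolding pvAltLoop's slices into take/drop (target ≥ 1 at the only call site)
theorem pvAltLoop_eq (t cap : Int) (bs : List String) (ht : 1 ≤ t) :
    pvAltLoop t cap bs =
      if bs = [] then []
      else if cap ≤ 0 then [bs]
      else bs.take t.toNat :: pvAltLoop t (cap - 1) (bs.drop t.toNat) := by
  rcases eq_or_ne bs [] with h | h
  · rw [pvAltLoop]; simp [h]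
  · rw [pvAltLoop, if_neg h, if_neg h]
    by_cases hc : cap ≤ 0
    · rw [if_pos hc, if_pos hc]
    · rw [if_neg hc, if_neg hc, PySem.List.slice_to bs (by omega : (0:Int) ≤ t), PySem.List.slice_from bs (by omega : (0:Int) ≤ t)]

-- main correspondence: A's flush loop from state (merged, []) produces exactly the
-- joined slices that pvAltLoop cuts, with cap - |merged| groups still allowed
theorem pvMain (t cap : Int) (ht : 1 ≤ t) : ∀ (N : Nat) (bs : List String), bs.length ≤ N →
    ∀ (merged : List String),
    pvFinish (bs.foldl (pvAStep t cap) (merged, [])) =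
      merged ++ (pvAltLoop t (cap - merged.length) bs).map (PySem.Str.join "\n") := by
  intro N
  induction N with
  | zero =>
    intro bs hb merged
    have : bs = [] := List.eq_nil_of_length_eq_zero (by omega)
    subst this
    rw [pvAltLoop]
    simp [pvFinish]
  | succ N ih =>
    intro bs hb merged
    rcases eq_or_ne bs [] with hnil | hnil
    · subst hnil; rw [pvAltLoop]; simp [pvFinish]
    · rw [pvAltLoop_eq t _ bs ht, if_neg hnil]
      by_cases hcap : cap - (merged.length : Int) ≤ 0
      · -- no group slots left: everything piles into one final chunk
        rw [if_pos hcap, pvAStep_full t cap bs merged [] (by omega)]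
        simp [pvFinish, hnil]
      · rw [if_neg hcap]
        by_cases hsm : (bs.length : Int) < t
        · -- fewer than target blocks left: no flush, one final group
          have hsm' : ((([] : List String).length : Int) + bs.length) < t := by
            simpa using hsm
          rw [pvAStep_small t cap bs merged [] hsm']
          have htk : bs.take t.toNat = bs := List.take_of_length_le (by omega)
          have hdr : bs.drop t.toNat = [] := List.drop_eq_nil_of_le (by omega)
          rw [htk, hdr, pvAltLoop]
          simp [pvFinish, hnil]
        · -- a full group is flushed, then recurse on the remaining suffix
          rw [not_lt] at hsm
          have hflush := pvAStep_flush t cap bs merged [] (by omega) (by simp; omega)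
            (by simpa using hsm)
          simp only [List.length_nil, Nat.cast_zero, Int.sub_zero, List.nil_append] at hflush
          rw [hflush]
          have hlen : (bs.drop t.toNat).length ≤ N := by
            have h1 : 1 ≤ t.toNat := by omega
            have h2 : 0 < bs.length := List.length_pos_of_ne_nil hnil
            simp only [List.length_drop]; omega
          rw [ih (bs.drop t.toNat) hlen (merged ++ [PySem.Str.join "\n" (bs.take t.toNat)])]
          simp only [List.length_append, List.length_cons, List.length_nil, List.map_cons,
            List.append_assoc, List.singleton_append]
          congr 2
          push_cast
          ring_nf

-- ===== VERDICT (by name: the statement is the Claim_ definition above) =====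
theorem compact_blocks_py_spec : Claim_equal_compact_blocks_py := by
  intro raw_text max_cards _ _
  unfold Spec_compact_blocks_py compact_blocks_py compact_blocks_py_alt
  by_cases h : ((pvBlocks raw_text).length : Int) ≤ max_cards
  · simp only [h, if_pos]
  · simp only [h, if_neg, not_false_iff]
    have ht : 1 ≤ pvTarget ((pvBlocks raw_text).length : Int) max_cards := le_max_left 1 _
    have := pvMain (pvTarget ((pvBlocks raw_text).length : Int) max_cards) (max_cards - 1) ht
      (pvBlocks raw_text).length (pvBlocks raw_text) le_rfl []
    simp only [List.length_nil, Nat.cast_zero, Int.sub_zero, List.nil_append] at this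
    rw [this]
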